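-- pv_equiv track=rewrite | github.com/cristiancolon/ChronicGambler | w2_bot_fabian/player.py | board_has_paired
-- ===== SOURCE A (Python) =====
-- def board_has_paired(board_cards):
--     ranks_count = {}
--     for c in board_cards:
--         r = c[0]
--         ranks_count[r] = ranks_count.get(r, 0) + 1
--         if ranks_count[r] >= 2:
--             return True
--     return False
-- ===== SOURCE B (Python) =====
-- def board_has_paired(board_cards):
--     ranks = [c[0] for c in board_cards]
--     return len(set(ranks)) != len(ranks)
-- ===== Notes on version B (the rewrite author's own statement) =====
-- stated objective: idiomatic
-- what changed: A increments a per-rank counter dict card by card and early-returns on the first rank seen twice; B builds the whole rank list once and compares the number of distinct ranks with the total count, with no per-element branch or early return.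
-- outside the precondition, e.g. on board_has_paired(['Ah', 'Ad', '']): A returns True, B raises IndexError
import Mathlib
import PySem

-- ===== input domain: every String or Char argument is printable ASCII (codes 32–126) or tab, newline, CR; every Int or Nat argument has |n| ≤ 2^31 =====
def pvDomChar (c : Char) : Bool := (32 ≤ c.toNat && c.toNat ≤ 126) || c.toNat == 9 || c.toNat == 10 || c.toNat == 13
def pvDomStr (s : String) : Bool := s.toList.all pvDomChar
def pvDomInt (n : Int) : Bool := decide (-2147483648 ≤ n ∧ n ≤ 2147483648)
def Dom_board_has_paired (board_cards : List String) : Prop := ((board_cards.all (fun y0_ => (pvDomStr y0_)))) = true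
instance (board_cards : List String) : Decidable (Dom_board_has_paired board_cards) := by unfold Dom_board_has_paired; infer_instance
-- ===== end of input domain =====

-- B replaces A's incremental counter-with-early-return by one pass building the rank list
-- and a distinct-count vs total-count comparison (idiomatic; same O(n) cost).


-- ===== PORT A =====
-- c[0] is ported as (PySem.Str.pyGet? c 0).getD ' '; exact whenever c ≠ "" (Pre_ excludes "").
def pvRank (c : String) : Char := (PySem.Str.pyGet? c 0).getD ' '

def boardLoopA : List String → PySem.Dict Char Int → Bool
  | [], _ => false
  | c :: cs, d =>
    let r := pvRank c
    let d' := d.insert r (d.getD r 0 + 1)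
    if d'.getD r 0 ≥ 2 then true else boardLoopA cs d'

def board_has_paired (board_cards : List String) : Bool :=
  boardLoopA board_cards PySem.Dict.empty

-- ===== PORT B =====
def board_has_paired_alt (board_cards : List String) : Bool :=
  let ranks := board_cards.map pvRank
  decide ((PySem.Set.ofList ranks).length ≠ ranks.length)

-- ===== PRECONDITION & SPEC =====
-- Pre_ excludes boards containing an empty string card: Python B always raises IndexError there, and A itself raises unless its early return on a pair fires before reaching the empty card.
def Pre_board_has_paired (board_cards : List String) : Prop :=
  ∀ s ∈ board_cards, s ≠ ""
instance (board_cards : List String) : Decidable (Pre_board_has_paired board_cards) := by unfold Pre_board_has_paired; infer_instance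

def pvWitness_board_has_paired : List String := ["As", "Kd", "Ah"]

def Spec_board_has_paired (board_cards : List String) (out : Bool) : Prop := out = board_has_paired_alt board_cards
instance (board_cards : List String) (out : Bool) : Decidable (Spec_board_has_paired board_cards out) := by unfold Spec_board_has_paired; infer_instance

-- ===== CLAIM (what is proved, stated in full; the proofs are below) =====
def Claim_equal_board_has_paired : Prop := ∀ (board_cards : List String), Dom_board_has_paired board_cards → Pre_board_has_paired board_cards → Spec_board_has_paired board_cards (board_has_paired board_cards)

-- ===== LEMMAS AND PROOFS =====

-- A's loop, started with a dict counting each seen rank once, decides duplication of seen ++ ranks.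
theorem boardLoopA_spec (cards : List String) :
    ∀ (seen : List Char) (d : PySem.Dict Char Int), seen.Nodup →
    (∀ ch, d.getD ch 0 = if ch ∈ seen then (1 : Int) else 0) →
    boardLoopA cards d = !decide ((seen ++ cards.map pvRank).Nodup) := by
  induction cards with
  | nil =>
    intro seen d hnd _
    simp [boardLoopA, hnd]
  | cons c cs ih =>
    intro seen d hnd hinv
    simp only [boardLoopA, List.map_cons]
    by_cases hmem : pvRank c ∈ seen
    · have h1 : d.getD (pvRank c) 0 = 1 := by rw [hinv]; simp [hmem]
      have h2 : (d.insert (pvRank c) (d.getD (pvRank c) 0 + 1)).getD (pvRank c) 0 = 2 := by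
        rw [PySem.Dict.getD_insert_self, h1]; norm_num
      rw [h2]
      have hnot : ¬ (seen ++ pvRank c :: cs.map pvRank).Nodup := by
        intro hcon
        rcases List.nodup_append.1 hcon with ⟨_, _, hdisj⟩
        exact hdisj _ hmem _ (List.mem_cons_self ..) rfl
      simp [hnot]
    · have h0 : d.getD (pvRank c) 0 = 0 := by rw [hinv]; simp [hmem]
      have hlt : ¬ ((d.insert (pvRank c) (d.getD (pvRank c) 0 + 1)).getD (pvRank c) 0 ≥ 2) := by
        rw [PySem.Dict.getD_insert_self, h0]; norm_num
      rw [if_neg hlt]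
      have hrec := ih (seen ++ [pvRank c]) (d.insert (pvRank c) (d.getD (pvRank c) 0 + 1))
        (by
          simp only [List.nodup_append, List.nodup_cons, List.nodup_nil]
          exact ⟨hnd, by simp, by intro a ha b hb; simp at hb; subst hb; exact fun h => hmem (h ▸ ha)⟩)
        (by
          intro ch
          rw [PySem.Dict.getD_insert, h0]
          by_cases hch : ch = pvRank c <;> simp [hch, hmem, hinv])
      rw [hrec]
      congr 1
      simp [List.append_assoc]

-- B's distinct-count test decides duplication of the rank list.
theorem len_ofList_ne_iff (l : List Char) :
    ((PySem.Set.ofList l).length ≠ l.length) ↔ ¬ l.Nodup := by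
  constructor
  · intro h hnd
    exact h (by rw [PySem.Set.ofList_eq_self_of_nodup _ hnd])
  · intro hnd h
    apply hnd
    clear hnd
    induction l using List.reverseRecOn with
    | nil => simp
    | append_singleton xs x ihx =>
      rw [PySem.Set.ofList_append_singleton] at h
      by_cases hx : x ∈ PySem.Set.ofList xs
      · exfalso
        rw [PySem.Set.add_of_mem hx] at h
        have := PySem.Set.length_ofList_le (xs := xs)
        simp [List.length_append] at h
        omega
      · rw [PySem.Set.add_of_not_mem hx] at h
        simp only [List.length_append, List.length_cons, List.length_nil] at h
        have hxs := ihx (by omega)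
        have hxmem : x ∉ xs := fun hm => hx ((PySem.Set.mem_ofList _ _).2 hm)
        simp only [List.nodup_append, List.nodup_cons, List.nodup_nil]
        exact ⟨hxs, by simp, by intro a ha b hb; simp at hb; subst hb; exact fun h => hxmem (h ▸ ha)⟩

-- ===== VERDICT (by name: the statement is the Claim_ definition above) =====
theorem board_has_paired_spec : Claim_equal_board_has_paired := by
  intro bc _ _
  unfold Spec_board_has_paired board_has_paired board_has_paired_alt
  rw [boardLoopA_spec bc [] PySem.Dict.empty List.nodup_nil (by intro ch; rfl)]
  simp only [List.nil_append]
  rw [Bool.eq_iff_iff]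
  simp
  have h := len_ofList_ne_iff (bc.map pvRank)
  rw [List.length_map] at h
  exact h.symm
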